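-- pv_equiv track=rewrite | github.com/12vectors/carta | tools/carta_checks.py | _extract_top_level_bullets
-- ===== SOURCE A (Python) =====
-- from typing import Optional
--
-- def _strip_code_blocks(text: str) -> str:
--     """Remove fenced code blocks from text so word counts exclude code."""
--     out: list[str] = []
--     in_fence = False
--     for line in text.splitlines():
--         if line.lstrip().startswith("```"):
--             in_fence = not in_fence
--             continue
--         if not in_fence:
--             out.append(line)
--     return "\n".join(out)
--
-- def _extract_top_level_bullets(text: str) -> list[str]:
--     """Return top-level bullet items from a section (ignoring nested bullets)."""
--     bullets: list[str] = []
--     current: Optional[list[str]] = None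
--     in_fence = False
--
--     for line in _strip_code_blocks(text).splitlines():
--         # A top-level bullet starts with '-' or '*' with no leading whitespace
--         # (allow up to 1 leading space for formatting tolerance).
--         raw = line.rstrip()
--         if raw.startswith("- ") or raw.startswith("* "):
--             if current is not None:
--                 bullets.append(" ".join(current).strip())
--             current = [raw[2:].strip()]
--         elif raw.startswith("  ") and current is not None:
--             # Continuation of the current bullet (wrapped line or nested content).
--             current.append(raw.strip())
--         elif raw == "":
--             # Blank line — preserve current; continuation stops only on new content.
--             continue
--         else:
--             # Non-bullet content ends the current bullet.
--             if current is not None: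
--                 bullets.append(" ".join(current).strip())
--                 current = None
--     if current is not None:
--         bullets.append(" ".join(current).strip())
--     return [b for b in bullets if b]
-- ===== SOURCE B (Python) =====
-- from typing import Optional
--
-- def _extract_top_level_bullets(text: str) -> list[str]:
--     """Single pass over the raw lines: fence handling is fused into the bullet
--     scan (no separate strip-code-blocks string is built), the current bullet is
--     kept as one growing string instead of a list of pieces, and empty bullets
--     are dropped at flush time instead of by a final filter."""
--     bullets: list[str] = []
--     current: Optional[str] = None
--     in_fence = False
--
--     def flush(cur: str) -> None:
--         b = cur.strip()
--         if b != "":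
--             bullets.append(b)
--
--     for line in text.splitlines():
--         if line.lstrip().startswith("```"):
--             in_fence = not in_fence
--             continue
--         if in_fence:
--             continue
--         raw = line.rstrip()
--         if raw.startswith("- ") or raw.startswith("* "):
--             if current is not None:
--                 flush(current)
--             current = raw[2:].strip()
--         elif raw.startswith("  ") and current is not None:
--             current = current + " " + raw.strip()
--         elif raw == "":
--             continue
--         else:
--             if current is not None:
--                 flush(current)
--                 current = None
--     if current is not None:
--         flush(current)
--     return bullets
-- ===== Notes on version B (the rewrite author's own statement) =====
-- stated objective: alternative
-- what changed: Fuses A's two passes (build a code-stripped string, then re-splitlines and scan) into one pass over the raw lines with an in_fence flag, keeps the current bullet as one growing string instead of a list joined at flush, and drops empty bullets at flush time instead of filtering at the end.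
import Mathlib
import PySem

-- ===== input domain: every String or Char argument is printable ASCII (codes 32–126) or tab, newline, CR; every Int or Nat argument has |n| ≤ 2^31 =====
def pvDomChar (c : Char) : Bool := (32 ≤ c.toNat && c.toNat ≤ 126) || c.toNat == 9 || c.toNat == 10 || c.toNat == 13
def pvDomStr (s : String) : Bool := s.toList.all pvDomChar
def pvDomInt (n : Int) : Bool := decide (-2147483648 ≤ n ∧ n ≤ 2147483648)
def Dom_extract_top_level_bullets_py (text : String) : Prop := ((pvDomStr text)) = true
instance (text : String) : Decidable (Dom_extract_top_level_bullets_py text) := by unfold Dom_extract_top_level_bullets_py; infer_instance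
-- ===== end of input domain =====

-- B fuses A's two passes (strip code blocks into a new string, then rescan it) into one
-- pass over the raw lines with an in-fence flag, grows the current bullet as one string
-- instead of a joined list, and drops empty bullets at flush time instead of filtering
-- at the end (objective: alternative decomposition, same cost).

-- ===== PORT A =====
def pvStepStrip (st : List String × Bool) (line : String) : List String × Bool :=
  if PySem.Str.startswith (PySem.Str.lstrip line) "```" then (st.1, !st.2)
  else if st.2 then st
  else (st.1 ++ [line], st.2)

def pvStripCodeBlocks (text : String) : String :=
  PySem.Str.join "\n" ((PySem.Str.splitlines text).foldl pvStepStrip ([], false)).1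

def pvJoinStrip (cur : List String) : String :=
  PySem.Str.strip (PySem.Str.join " " cur)

def pvStepA (st : List String × Option (List String)) (line : String) :
    List String × Option (List String) :=
  let raw := PySem.Str.rstrip line
  if PySem.Str.startswith raw "- " || PySem.Str.startswith raw "* " then
    ((match st.2 with
      | some cur => st.1 ++ [pvJoinStrip cur]
      | none => st.1),
     some [PySem.Str.strip (PySem.Str.slice raw (some 2) none)])
  else if PySem.Str.startswith raw "  " && st.2.isSome then
    (st.1, st.2.map (fun cur => cur ++ [PySem.Str.strip raw]))
  else if raw == "" then st
  else
    match st.2 with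
    | some cur => (st.1 ++ [pvJoinStrip cur], none)
    | none => st

def extract_top_level_bullets_py (text : String) : List String :=
  let st := (PySem.Str.splitlines (pvStripCodeBlocks text)).foldl pvStepA ([], none)
  let bullets := match st.2 with
    | some cur => st.1 ++ [pvJoinStrip cur]
    | none => st.1
  bullets.filter (fun b => !(b == ""))

-- ===== PORT B =====
def pvFlushB (bullets : List String) (cur : String) : List String :=
  let b := PySem.Str.strip cur
  if b == "" then bullets else bullets ++ [b]

def pvStepB (st : List String × Option String × Bool) (line : String) :
    List String × Option String × Bool :=
  if PySem.Str.startswith (PySem.Str.lstrip line) "```" then (st.1, st.2.1, !st.2.2)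
  else if st.2.2 then st
  else
    let raw := PySem.Str.rstrip line
    if PySem.Str.startswith raw "- " || PySem.Str.startswith raw "* " then
      ((match st.2.1 with
        | some c => pvFlushB st.1 c
        | none => st.1),
       some (PySem.Str.strip (PySem.Str.slice raw (some 2) none)), st.2.2)
    else if PySem.Str.startswith raw "  " && st.2.1.isSome then
      (st.1, st.2.1.map (fun c => c ++ " " ++ PySem.Str.strip raw), st.2.2)
    else if raw == "" then st
    else
      ((match st.2.1 with
        | some c => pvFlushB st.1 c
        | none => st.1), none, st.2.2)

def extract_top_level_bullets_py_alt (text : String) : List String :=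
  let st := (PySem.Str.splitlines text).foldl pvStepB ([], none, false)
  match st.2.1 with
  | some c => pvFlushB st.1 c
  | none => st.1

-- ===== PRECONDITION & SPEC =====
def Spec_extract_top_level_bullets_py (text : String) (out : List String) : Prop := out = extract_top_level_bullets_py_alt text
instance (text : String) (out : List String) : Decidable (Spec_extract_top_level_bullets_py text out) := by unfold Spec_extract_top_level_bullets_py; infer_instance

-- ===== CLAIM (what is proved, stated in full; the proofs are below) =====
def Claim_equal_extract_top_level_bullets_py : Prop := ∀ (text : String), Dom_extract_top_level_bullets_py text → Spec_extract_top_level_bullets_py text (extract_top_level_bullets_py text)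

-- ===== LEMMAS AND PROOFS =====

-- the line-break predicate used by Python's splitlines
def pvIsB (c : Char) : Bool :=
  decide (c.toNat = 10) || decide (c.toNat = 13) || decide (c.toNat = 11) || decide (c.toNat = 12) ||
  decide (c.toNat = 28) || decide (c.toNat = 29) || decide (c.toNat = 30) || decide (c.toNat = 133) ||
  decide (c.toNat = 8232) || decide (c.toNat = 8233)

theorem pvSplitlines_eq (s : List Char) :
    PySem.Chars.splitlines s = PySem.Chars.splitlines.go pvIsB s [] [] := rfl

theorem pvGo_nil (f : Char → Bool) (cur acc) :
    PySem.Chars.splitlines.go f [] cur acc =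
      if cur.isEmpty then acc.reverse else (cur.reverse :: acc).reverse := by
  rw [PySem.Chars.splitlines.go]

theorem pvGo_crlf (f : Char → Bool) (rest cur acc) :
    PySem.Chars.splitlines.go f ('\r' :: '\n' :: rest) cur acc =
      PySem.Chars.splitlines.go f rest [] (cur.reverse :: acc) := by
  rw [PySem.Chars.splitlines.go]

theorem pvGo_cons (f : Char → Bool) (c : Char) (rest cur acc) (h : c ≠ '\r') :
    PySem.Chars.splitlines.go f (c :: rest) cur acc =
      if f c then PySem.Chars.splitlines.go f rest [] (cur.reverse :: acc)
      else PySem.Chars.splitlines.go f rest (c :: cur) acc := by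
  cases rest with
  | nil =>
    rw [PySem.Chars.splitlines.go]
    by_cases hf : f c <;> simp [hf, PySem.Chars.splitlines.go]
  | cons d rest' =>
    rw [PySem.Chars.splitlines.go]
    intro _ hc _; exact h hc

theorem pvNotR {c : Char} (h : pvIsB c = false) : c ≠ '\r' := by
  intro hc; subst hc; simp [pvIsB] at h

theorem pvGo_cons' (f : Char → Bool) (c : Char) (rest cur acc)
    (h : ∀ r, c = '\r' → rest = '\n' :: r → False) :
    PySem.Chars.splitlines.go f (c :: rest) cur acc =
      if f c then PySem.Chars.splitlines.go f rest [] (cur.reverse :: acc)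
      else PySem.Chars.splitlines.go f rest (c :: cur) acc := by
  cases rest with
  | nil =>
    rw [PySem.Chars.splitlines.go]
    by_cases hf : f c <;> simp [hf, PySem.Chars.splitlines.go]
  | cons d rest' =>
    rw [PySem.Chars.splitlines.go]
    exact fun r hc he => h r hc he

theorem pvAccExt {cur : List Char} {acc : List (List Char)}
    (hacc : ∀ l ∈ acc, ∀ c ∈ l, pvIsB c = false)
    (hcur : ∀ c ∈ cur, pvIsB c = false) :
    ∀ l ∈ cur.reverse :: acc, ∀ c ∈ l, pvIsB c = false := by
  intro l hl c hc
  rcases List.mem_cons.mp hl with hl | hl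
  · exact hcur c (by simpa [hl] using hc)
  · exact hacc l hl c hc

-- every line produced by splitlines is break-free
theorem pvGo_bf (cs cur acc)
    (hacc : ∀ l ∈ acc, ∀ c ∈ l, pvIsB c = false)
    (hcur : ∀ c ∈ cur, pvIsB c = false) :
    ∀ l ∈ PySem.Chars.splitlines.go pvIsB cs cur acc, ∀ c ∈ l, pvIsB c = false := by
  induction cs, cur, acc using PySem.Chars.splitlines.go.induct (isB := pvIsB) with
  | case1 cur acc h =>
    rw [pvGo_nil, if_pos h]; simpa using hacc
  | case2 cur acc h =>
    rw [pvGo_nil, if_neg h]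
    intro l hl c hc
    exact pvAccExt hacc hcur l (by simpa [or_comm] using hl) c hc
  | case3 rest cur acc ih =>
    rw [pvGo_crlf]
    exact ih (pvAccExt hacc hcur) (by simp)
  | case4 c rest cur acc hne hb ih =>
    rw [pvGo_cons' _ _ _ _ _ hne, if_pos hb]
    exact ih (pvAccExt hacc hcur) (by simp)
  | case5 c rest cur acc hne hb ih =>
    have hb' : pvIsB c = false := by simpa using hb
    rw [pvGo_cons' _ _ _ _ _ hne, if_neg hb]
    refine ih hacc ?_
    intro d hd
    rcases List.mem_cons.mp hd with hd | hd
    · simpa [hd] using hb'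
    · exact hcur d hd

theorem pvSplitlines_bf (s : List Char) :
    ∀ l ∈ PySem.Chars.splitlines s, ∀ c ∈ l, pvIsB c = false := by
  rw [pvSplitlines_eq]
  exact pvGo_bf s [] [] (by simp) (by simp)

-- running go over a break-free prefix just accumulates it
theorem pvGo_append (l : List Char) (hl : ∀ c ∈ l, pvIsB c = false) (r cur acc) :
    PySem.Chars.splitlines.go pvIsB (l ++ r) cur acc =
      PySem.Chars.splitlines.go pvIsB r (l.reverse ++ cur) acc := by
  induction l generalizing cur with
  | nil => simp
  | cons c l' ih =>
    have hc : pvIsB c = false := hl c (List.mem_cons_self ..)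
    rw [List.cons_append, pvGo_cons _ _ _ _ _ (pvNotR hc), if_neg (by simp [hc]),
      ih (fun d hd => hl d (List.mem_cons_of_mem _ hd))]
    simp

-- Python's splitlines of a "\n"-join: every piece comes back, except one trailing empty piece
def pvTrim : List (List Char) → List (List Char)
  | [] => []
  | [l] => if l.isEmpty then [] else [l]
  | l :: l' :: rest => l :: pvTrim (l' :: rest)

theorem pvGo_join (ls : List (List Char)) (hbf : ∀ l ∈ ls, ∀ c ∈ l, pvIsB c = false) (acc) :
    PySem.Chars.splitlines.go pvIsB (List.intercalate ['\n'] ls) [] acc =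
      acc.reverse ++ pvTrim ls := by
  induction ls generalizing acc with
  | nil => simp [List.intercalate, pvGo_nil, pvTrim]
  | cons l rest ih =>
    have hl : ∀ c ∈ l, pvIsB c = false := fun c hc => hbf l (List.mem_cons_self ..) c hc
    cases rest with
    | nil =>
      have h0 : List.intercalate ['\n'] [l] = l ++ [] := by simp [List.intercalate]
      rw [h0, pvGo_append l hl [] [] acc, pvGo_nil]
      by_cases h : l.isEmpty <;> simp [pvTrim, h]
    | cons l' rest' =>
      have h0 : List.intercalate ['\n'] (l :: l' :: rest') =
          l ++ '\n' :: List.intercalate ['\n'] (l' :: rest') := by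
        simp [List.intercalate, List.intersperse]
      have h1 : (l.reverse ++ ([] : List Char)).reverse = l := by simp
      have h2 : pvIsB '\n' = true := by decide
      rw [h0, pvGo_append l hl _ [] acc,
        pvGo_cons _ _ _ _ _ (by decide), if_pos h2, h1,
        ih (fun x hx c hc => hbf x (List.mem_cons_of_mem _ hx) c hc) (l :: acc)]
      simp [pvTrim]

def pvTrimS : List String → List String
  | [] => []
  | [l] => if l == "" then [] else [l]
  | l :: l' :: rest => l :: pvTrimS (l' :: rest)

theorem pvTrim_mapS (out : List String) :
    (pvTrim (out.map String.toList)).map String.ofList = pvTrimS out := by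
  induction out with
  | nil => simp [pvTrim, pvTrimS]
  | cons l rest ih =>
    cases rest with
    | nil =>
      by_cases h : l = "" <;> simp [pvTrim, pvTrimS, h, List.isEmpty_iff, String.toList_eq_nil_iff]
    | cons l' rest' => simpa [pvTrim, pvTrimS] using ih

theorem pvStrSplitlines_bf (text : String) :
    ∀ s ∈ PySem.Str.splitlines text, ∀ c ∈ s.toList, pvIsB c = false := by
  intro s hs
  unfold PySem.Str.splitlines at hs
  simp only [List.mem_map] at hs
  obtain ⟨l, hl, rfl⟩ := hs
  simpa using pvSplitlines_bf _ l hl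

theorem pvSplitlines_join (out : List String)
    (hbf : ∀ s ∈ out, ∀ c ∈ s.toList, pvIsB c = false) :
    PySem.Str.splitlines (PySem.Str.join "\n" out) = pvTrimS out := by
  unfold PySem.Str.splitlines
  rw [PySem.Str.toList_join,
    show PySem.Chars.join "\n".toList (out.map String.toList) =
      List.intercalate ['\n'] (out.map String.toList) from rfl,
    pvSplitlines_eq,
    pvGo_join _ (by
      intro l hlmem c hc
      simp only [List.mem_map] at hlmem
      obtain ⟨str, hstr, rfl⟩ := hlmem
      exact hbf str hstr c hc) []]
  simpa using pvTrim_mapS out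

-- the fence filter computed by _strip_code_blocks
def pvFence : List String → Bool → List String
  | [], _ => []
  | l :: rest, f =>
    if PySem.Str.startswith (PySem.Str.lstrip l) "```" then pvFence rest (!f)
    else if f then pvFence rest f
    else l :: pvFence rest f

theorem pvFence_cons (l : String) (rest : List String) (f : Bool) :
    pvFence (l :: rest) f =
      if PySem.Str.startswith (PySem.Str.lstrip l) "```" then pvFence rest (!f)
      else if f then pvFence rest f else l :: pvFence rest f := rfl

theorem pvStripFold (lines : List String) (out : List String) (f : Bool) :
    (lines.foldl pvStepStrip (out, f)).1 = out ++ pvFence lines f := by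
  induction lines generalizing out f with
  | nil => simp [pvFence]
  | cons l rest ih =>
    have hstep : pvStepStrip (out, f) l =
        if PySem.Str.startswith (PySem.Str.lstrip l) "```" then (out, !f)
        else if f then (out, f) else (out ++ [l], f) := rfl
    rw [List.foldl_cons, hstep]
    unfold pvFence
    split_ifs with h1 h2
    · exact ih out (!f)
    · exact ih out f
    · rw [ih]; simp

theorem pvFence_mem (lines : List String) (f : Bool) :
    ∀ l ∈ pvFence lines f, l ∈ lines := by
  induction lines generalizing f with
  | nil => simp [pvFence]
  | cons l rest ih =>
    intro x hx
    unfold pvFence at hx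
    by_cases h1 : PySem.Str.startswith (PySem.Str.lstrip l) "```" = true
    · rw [if_pos h1] at hx
      exact List.mem_cons_of_mem _ (ih _ x hx)
    · rw [if_neg h1] at hx
      by_cases hf : f = true
      · rw [if_pos hf] at hx
        exact List.mem_cons_of_mem _ (ih _ x hx)
      · rw [if_neg hf] at hx
        rcases List.mem_cons.mp hx with h | h
        · simp [h]
        · exact List.mem_cons_of_mem _ (ih _ x h)

-- a suppressed trailing empty line is a no-op for A's bullet scan
theorem pvStepA_empty (st) : pvStepA st "" = st := by
  have e1 : ¬ ((PySem.Str.startswith (PySem.Str.rstrip "") "- " ||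
      PySem.Str.startswith (PySem.Str.rstrip "") "* ") = true) := by decide
  have e2 : PySem.Str.startswith (PySem.Str.rstrip "") "  " = false := by decide
  have e3 : (PySem.Str.rstrip "" == "") = true := by decide
  have e2' : ¬ ((PySem.Str.startswith (PySem.Str.rstrip "") "  " && st.2.isSome) = true) := by
    rw [e2]; simp
  unfold pvStepA
  rw [if_neg e1, if_neg e2', if_pos e3]

theorem pvFoldA_trim (ls : List String) (st) :
    (pvTrimS ls).foldl pvStepA st = ls.foldl pvStepA st := by
  induction ls generalizing st with
  | nil => simp [pvTrimS]
  | cons l rest ih =>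
    cases rest with
    | nil =>
      by_cases h : l = "" <;> simp [pvTrimS, h, pvStepA_empty]
    | cons l' rest' => simpa [pvTrimS] using ih _

-- state relation between A's scan (over fence-filtered lines) and B's fused scan
def pvRel (a : List String × Option (List String)) (b : List String × Option String × Bool)
    (f : Bool) : Prop :=
  b.1 = a.1.filter (fun s => !(s == "")) ∧
  b.2.1 = a.2.map (fun c => PySem.Str.join " " c) ∧
  b.2.2 = f ∧
  (∀ l, a.2 = some l → l ≠ [])

def pvFinishA (st : List String × Option (List String)) : List String :=
  (match st.2 with
   | some cur => st.1 ++ [pvJoinStrip cur]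
   | none => st.1).filter (fun b => !(b == ""))

def pvFinishB (st : List String × Option String × Bool) : List String :=
  match st.2.1 with
  | some c => pvFlushB st.1 c
  | none => st.1

theorem pvJoin_singleton (x : String) : PySem.Str.join " " [x] = x := by
  apply String.toList_inj.mp
  rw [PySem.Str.toList_join]
  simp [PySem.Chars.join, List.intercalate]

theorem pvInterc_append (sep : List Char) (ls : List (List Char)) (hls : ls ≠ []) (y : List Char) :
    List.intercalate sep (ls ++ [y]) = List.intercalate sep ls ++ sep ++ y := by
  induction ls with
  | nil => exact absurd rfl hls
  | cons a rest ih =>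
    cases rest with
    | nil => simp [List.intercalate, List.intersperse]
    | cons b rest' =>
      rw [List.cons_append,
        show List.intercalate sep (a :: (b :: rest' ++ [y])) =
          a ++ sep ++ List.intercalate sep (b :: rest' ++ [y]) from by
            cases rest' <;> simp [List.intercalate, List.intersperse],
        ih (by simp),
        show List.intercalate sep (a :: b :: rest') =
          a ++ sep ++ List.intercalate sep (b :: rest') from by
            simp [List.intercalate, List.intersperse]]
      simp

theorem pvJoin_append (l : List String) (hl : l ≠ []) (x : String) :
    PySem.Str.join " " (l ++ [x]) = PySem.Str.join " " l ++ " " ++ x := by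
  apply String.toList_inj.mp
  rw [String.toList_append, String.toList_append, PySem.Str.toList_join, PySem.Str.toList_join]
  show List.intercalate [' '] ((l ++ [x]).map String.toList) = _
  rw [List.map_append, List.map_singleton,
    pvInterc_append [' '] (l.map String.toList) (by simpa using hl) x.toList]
  rfl

theorem pvFlush_eq (bulA : List String) (c : List String) :
    (bulA ++ [pvJoinStrip c]).filter (fun s => !(s == "")) =
      pvFlushB (bulA.filter (fun s => !(s == ""))) (PySem.Str.join " " c) := by
  unfold pvFlushB pvJoinStrip
  rw [List.filter_append]
  by_cases h : PySem.Str.strip (PySem.Str.join " " c) = "" <;> simp [h]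

theorem pvRel_step (line : String) (a b)
    (hfc : ¬ PySem.Str.startswith (PySem.Str.lstrip line) "```" = true)
    (h : pvRel a b false) : pvRel (pvStepA a line) (pvStepB b line) false := by
  obtain ⟨h1, h2, h3, h4⟩ := h
  have hb2 : ¬ (b.2.2 = true) := by rw [h3]; simp
  unfold pvStepA pvStepB
  rw [if_neg hfc, if_neg hb2]
  by_cases hb : (PySem.Str.startswith (PySem.Str.rstrip line) "- " ||
      PySem.Str.startswith (PySem.Str.rstrip line) "* ") = true
  · rw [if_pos hb, if_pos hb]
    cases ha : a.2 with
    | none =>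
      rw [h2, ha]
      exact ⟨by simpa [ha] using h1, by simp [pvJoin_singleton], h3, by simp⟩
    | some c =>
      rw [h2, ha]
      refine ⟨?_, by simp [pvJoin_singleton], h3, by simp⟩
      simp only [h1, Option.map_some]
      exact (pvFlush_eq a.1 c).symm
  · rw [if_neg hb, if_neg hb]
    have hsome : b.2.1.isSome = a.2.isSome := by rw [h2]; simp
    by_cases hc : (PySem.Str.startswith (PySem.Str.rstrip line) "  " && a.2.isSome) = true
    · have hcB : (PySem.Str.startswith (PySem.Str.rstrip line) "  " && b.2.1.isSome) = true := by
        rw [hsome]; exact hc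
      rw [if_pos hc, if_pos hcB]
      refine ⟨h1, ?_, h3, ?_⟩
      · cases ha : a.2 with
        | none => exact absurd hc (by simp [ha])
        | some c =>
          rw [h2, ha]
          simp only [Option.map_some]
          rw [pvJoin_append c (h4 c ha)]
      · intro l hl
        cases ha : a.2 with
        | none => simp [ha] at hl
        | some c => simp [ha] at hl; simp [← hl]
    · have hcB : ¬ ((PySem.Str.startswith (PySem.Str.rstrip line) "  " && b.2.1.isSome) = true) := by
        rw [hsome]; exact hc
      rw [if_neg hc, if_neg hcB]
      by_cases he : (PySem.Str.rstrip line == "") = true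
      · rw [if_pos he, if_pos he]
        exact ⟨h1, h2, h3, h4⟩
      · rw [if_neg he, if_neg he]
        cases ha : a.2 with
        | none =>
          rw [h2, ha]
          refine ⟨h1, by simp [ha], h3, ?_⟩
          intro l hl
          rw [ha] at hl; cases hl
        | some c =>
          rw [h2, ha]
          refine ⟨?_, by simp, h3, by simp⟩
          simp only [h1, Option.map_some]
          exact (pvFlush_eq a.1 c).symm

theorem pvMain (lines : List String) (f : Bool) (a b) (h : pvRel a b f) :
    pvFinishB (lines.foldl pvStepB b) = pvFinishA ((pvFence lines f).foldl pvStepA a) := by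
  induction lines generalizing f a b with
  | nil =>
    obtain ⟨h1, h2, h3, h4⟩ := h
    simp only [List.foldl_nil, pvFence]
    unfold pvFinishA pvFinishB
    cases ha : a.2 with
    | none => rw [h2, ha]; simpa [ha] using h1
    | some c =>
      rw [h2, ha]
      simp only [Option.map_some]
      rw [h1, ← pvFlush_eq a.1 c]
  | cons line rest ih =>
    obtain ⟨h1, h2, h3, h4⟩ := h
    by_cases hfc : PySem.Str.startswith (PySem.Str.lstrip line) "```" = true
    · have hB : pvStepB b line = (b.1, b.2.1, !b.2.2) := by
        unfold pvStepB; rw [if_pos hfc]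
      have hF : pvFence (line :: rest) f = pvFence rest (!f) := by
        rw [pvFence_cons, if_pos hfc]
      rw [List.foldl_cons, hB, hF]
      exact ih (!f) a (b.1, b.2.1, !b.2.2) ⟨h1, h2, by simp [h3], h4⟩
    · by_cases hf : f = true
      · have hB : pvStepB b line = b := by
          unfold pvStepB; rw [if_neg hfc, if_pos (by rw [h3]; exact hf)]
        have hF : pvFence (line :: rest) f = pvFence rest f := by
          rw [pvFence_cons, if_neg hfc, if_pos hf]
        rw [List.foldl_cons, hB, hF]
        exact ih f a b ⟨h1, h2, h3, h4⟩
      · have hf' : f = false := by simpa using hf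
        subst hf'
        have hF : pvFence (line :: rest) false = line :: pvFence rest false := by
          rw [pvFence_cons, if_neg hfc]; simp
        rw [List.foldl_cons, hF, List.foldl_cons]
        exact ih false (pvStepA a line) (pvStepB b line)
          (pvRel_step line a b hfc ⟨h1, h2, h3, h4⟩)

-- ===== VERDICT (by name: the statement is the Claim_ definition above) =====
theorem extract_top_level_bullets_py_spec : Claim_equal_extract_top_level_bullets_py := by
  intro text _
  unfold Spec_extract_top_level_bullets_py
  show extract_top_level_bullets_py text = extract_top_level_bullets_py_alt text
  have hlines :
      PySem.Str.splitlines (pvStripCodeBlocks text) =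
        pvTrimS (pvFence (PySem.Str.splitlines text) false) := by
    unfold pvStripCodeBlocks
    rw [pvStripFold (PySem.Str.splitlines text) [] false, List.nil_append]
    exact pvSplitlines_join _ (fun s hs =>
      pvStrSplitlines_bf text s (pvFence_mem _ _ s hs))
  show pvFinishA ((PySem.Str.splitlines (pvStripCodeBlocks text)).foldl pvStepA ([], none)) =
      pvFinishB ((PySem.Str.splitlines text).foldl pvStepB ([], none, false))
  rw [hlines, pvFoldA_trim]
  exact (pvMain (PySem.Str.splitlines text) false ([], none) ([], none, false)
    ⟨rfl, rfl, rfl, by simp⟩).symm
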